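-- pv_equiv track=rewrite | github.com/theayanai/ai-crisis-command-center | backend/main.py | assign_staff
-- ===== SOURCE A (Python) =====
-- staff_list = [
--     {"name": "Security 1", "role": "security", "distance": 5},
--     {"name": "Security 2", "role": "security", "distance": 2},
--     {"name": "Medic 1", "role": "medical", "distance": 3},
--     {"name": "Fire Team 1", "role": "fire_team", "distance": 4},
-- ]
--
-- def assign_staff(teams: list[str]):
--     assigned = []
--
--     for team in teams:
--         candidates = [s for s in staff_list if s["role"] == team]
--         if candidates:
--             nearest = sorted(candidates, key=lambda x: x["distance"])[0]
--             assigned.append(nearest["name"])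
--
--     return assigned
-- ===== SOURCE B (Python) =====
-- staff_list = [
--     {"name": "Security 1", "role": "security", "distance": 5},
--     {"name": "Security 2", "role": "security", "distance": 2},
--     {"name": "Medic 1", "role": "medical", "distance": 3},
--     {"name": "Fire Team 1", "role": "fire_team", "distance": 4},
-- ]
--
-- def assign_staff(teams: list[str]):
--     best = {}
--     for s in staff_list:
--         r = s["role"]
--         if r not in best or s["distance"] < best[r][0]:
--             best[r] = (s["distance"], s["name"])
--     assigned = []
--     for team in teams:
--         if team in best:
--             assigned.append(best[team][1])
--     return assigned
-- ===== Notes on version B (the rewrite author's own statement) =====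
-- stated objective: simpler
-- what changed: Builds a role->(distance,name) nearest index in one pass over staff_list (strict '<' so the first of equal distances wins, matching sorted's stability), then maps each team through an O(1) dict lookup instead of per-team filter-and-sort scans.
import Mathlib
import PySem

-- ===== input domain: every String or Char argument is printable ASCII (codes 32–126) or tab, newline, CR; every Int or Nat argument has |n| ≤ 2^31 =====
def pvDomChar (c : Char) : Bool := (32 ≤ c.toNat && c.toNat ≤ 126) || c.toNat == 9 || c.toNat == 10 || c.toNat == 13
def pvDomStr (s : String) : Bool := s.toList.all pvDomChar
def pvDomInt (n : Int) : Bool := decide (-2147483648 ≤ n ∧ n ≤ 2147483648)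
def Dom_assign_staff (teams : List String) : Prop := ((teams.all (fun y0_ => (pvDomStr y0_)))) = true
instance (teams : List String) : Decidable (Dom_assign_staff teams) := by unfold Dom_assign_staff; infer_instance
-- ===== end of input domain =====

-- B replaces A's per-team filter-and-sort over staff_list by a single upfront role→nearest index plus O(1) lookups (simpler/cleaner).


-- ===== PORT A =====
-- each staff dict is (name, role, distance)
def pvStaffList : List (String × String × Int) :=
  [("Security 1", "security", 5), ("Security 2", "security", 2),
   ("Medic 1", "medical", 3), ("Fire Team 1", "fire_team", 4)]

def assign_staff (teams : List String) : List String :=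
  teams.foldl (fun assigned team =>
    let candidates := pvStaffList.filter (fun s => s.2.1 == team)
    match PySem.List.sorted candidates (fun x => x.2.2) false with
    | [] => assigned
    | nearest :: _ => assigned ++ [nearest.1]) []

-- ===== PORT B =====
def pvBestIndex : PySem.Dict String (Int × String) :=
  pvStaffList.foldl (fun best s =>
    match best.get? s.2.1 with
    | none => best.insert s.2.1 (s.2.2, s.1)
    | some p => if s.2.2 < p.1 then best.insert s.2.1 (s.2.2, s.1) else best)
    PySem.Dict.empty

def assign_staff_alt (teams : List String) : List String :=
  teams.foldl (fun assigned team =>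
    match pvBestIndex.get? team with
    | some p => assigned ++ [p.2]
    | none => assigned) []

-- ===== PRECONDITION & SPEC =====
def Spec_assign_staff (teams : List String) (out : List String) : Prop := out = assign_staff_alt teams
instance (teams : List String) (out : List String) : Decidable (Spec_assign_staff teams out) := by unfold Spec_assign_staff; infer_instance

-- ===== CLAIM (what is proved, stated in full; the proofs are below) =====
def Claim_equal_assign_staff : Prop := ∀ (teams : List String), Dom_assign_staff teams → Spec_assign_staff teams (assign_staff teams)

-- ===== LEMMAS AND PROOFS =====

-- per-team step agreement: A's filter-sort-head equals B's index lookup, for any team string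
theorem pv_step_eq (assigned : List String) (team : String) :
    (match PySem.List.sorted (pvStaffList.filter (fun s => s.2.1 == team)) (fun x => x.2.2) false with
     | [] => assigned
     | nearest :: _ => assigned ++ [nearest.1]) =
    (match pvBestIndex.get? team with
     | some p => assigned ++ [p.2]
     | none => assigned) := by
  by_cases h1 : team = "security"
  · subst h1; rfl
  by_cases h2 : team = "medical"
  · subst h2; rfl
  by_cases h3 : team = "fire_team"
  · subst h3; rfl
  have e1 : ("security" == team) = false := by simp; exact fun h => h1 h.symm
  have e2 : ("medical" == team) = false := by simp; exact fun h => h2 h.symm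
  have e3 : ("fire_team" == team) = false := by simp; exact fun h => h3 h.symm
  simp [pvStaffList, pvBestIndex, PySem.Dict.get?, PySem.Dict.empty, PySem.Dict.insert,
        List.filter, e1, e2, e3, PySem.List.sorted]

theorem pv_fold_eq (teams : List String) (assigned : List String) :
    teams.foldl (fun assigned team =>
      match PySem.List.sorted (pvStaffList.filter (fun s => s.2.1 == team)) (fun x => x.2.2) false with
      | [] => assigned
      | nearest :: _ => assigned ++ [nearest.1]) assigned =
    teams.foldl (fun assigned team =>
      match pvBestIndex.get? team with
      | some p => assigned ++ [p.2]
      | none => assigned) assigned := by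
  induction teams generalizing assigned with
  | nil => rfl
  | cons t ts ih =>
    simp only [List.foldl_cons]
    rw [pv_step_eq]
    exact ih _

-- ===== VERDICT (by name: the statement is the Claim_ definition above) =====
theorem assign_staff_spec : Claim_equal_assign_staff := by
  intro teams _
  unfold Spec_assign_staff assign_staff assign_staff_alt
  exact pv_fold_eq teams []
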